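-- pv_equiv track=rewrite | github.com/vipinsaini27/DSAlgo | Day 64 - Tries/Spelling Checker.py | solve
-- ===== SOURCE A (Python) =====
-- def solve(A, B):
--     ans = []
--     tree = [False, {}]
--
--     for word in A:
--         node = tree
--         for ch in word:
--             if ch not in node[1]:
--                 node[1][ch] = [False, {}]
--
--             node = node[1][ch]
--
--         node[0] = True
--
--     for word in B:
--         node = tree
--         is_found = True
--         for ch in word:
--             if ch not in node[1]:
--                 ans.append(0)
--                 is_found = False
--                 break
--             node = node[1][ch]
--
--         if is_found:
--             if node[0]:
--                 ans.append(1)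
--             else:
--                 ans.append(0)
--
--     return ans
-- ===== SOURCE B (Python) =====
-- def solve(A, B):
--     words = set(A)
--     return [1 if w in words else 0 for w in B]
-- ===== Notes on version B (the rewrite author's own statement) =====
-- stated objective: simpler
-- what changed: Replaces the character-by-character trie build and descent with a single set of whole words and one hash-membership test per query word.
import Mathlib
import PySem

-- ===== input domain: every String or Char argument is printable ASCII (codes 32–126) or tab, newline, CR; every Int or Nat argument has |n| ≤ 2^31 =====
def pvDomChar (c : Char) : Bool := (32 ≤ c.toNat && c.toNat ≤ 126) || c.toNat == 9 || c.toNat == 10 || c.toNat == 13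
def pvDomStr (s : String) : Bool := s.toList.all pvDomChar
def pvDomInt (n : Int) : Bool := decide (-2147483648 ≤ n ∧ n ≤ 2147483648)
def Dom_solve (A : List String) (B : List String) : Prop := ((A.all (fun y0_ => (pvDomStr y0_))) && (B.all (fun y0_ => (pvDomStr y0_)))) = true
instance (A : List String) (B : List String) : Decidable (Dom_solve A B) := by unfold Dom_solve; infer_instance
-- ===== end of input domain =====

-- B replaces A's character-trie with a single set of whole words and one membership test per query word (simpler; same results).


-- ===== PORT A =====
-- A's trie of nested dicts [flag, {ch: child}] is encoded as ONE dict keyed by the PATH from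
-- the root (List Char) with the node's flag as value (an index/path encoding of the nested
-- structure; 'ch in node[1]' becomes 'path ++ [ch] is a key'). Exact step for step otherwise.
-- inner loop of the insertion pass: 'for ch in word: if ch not in node[1]: node[1][ch] = [False,{}]; node = node[1][ch]'
def trieIns (st : List Char × PySem.Dict (List Char) Bool) (ch : Char) :
    List Char × PySem.Dict (List Char) Bool :=
  let p := st.1 ++ [ch]
  (p, if (st.2.get? p).isSome then st.2 else st.2.insert p false)

-- one word of the first loop, ending with 'node[0] = True'
def trieAdd (d : PySem.Dict (List Char) Bool) (w : List Char) : PySem.Dict (List Char) Bool :=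
  let st := w.foldl trieIns ([], d)
  st.2.insert st.1 true

-- the lookup loop of the second pass ('break' → returning 0), then 'if node[0]'
def trieLookup (d : PySem.Dict (List Char) Bool) : List Char → List Char → Int
  | path, [] =>
      match d.get? path with
      | some true => 1
      | _ => 0
  | path, ch :: rest =>
      if (d.get? (path ++ [ch])).isSome then trieLookup d (path ++ [ch]) rest else 0

def solve (A : List String) (B : List String) : List Int :=
  let tree := A.foldl (fun d w => trieAdd d w.toList) (PySem.Dict.empty.insert [] false)
  B.foldl (fun ans w => ans ++ [trieLookup tree [] w.toList]) []

-- ===== PORT B =====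
def solve_alt (A : List String) (B : List String) : List Int :=
  let words : PySem.Set String := PySem.Set.ofList A
  B.map (fun w => if PySem.Set.contains words w then 1 else 0)

-- ===== PRECONDITION & SPEC =====
def Spec_solve (A : List String) (B : List String) (out : List Int) : Prop := out = solve_alt A B
instance (A : List String) (B : List String) (out : List Int) : Decidable (Spec_solve A B out) := by unfold Spec_solve; infer_instance

-- ===== CLAIM (what is proved, stated in full; the proofs are below) =====
def Claim_equal_solve : Prop := ∀ (A : List String) (B : List String), Dom_solve A B → Spec_solve A B (solve A B)

-- ===== LEMMAS AND PROOFS =====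

-- Invariant of the path-keyed trie dict after inserting the words of S:
-- keys are exactly the root and the nonempty prefixes of words of S, and the flag at a key
-- says whether that key is itself a word of S.
def TrieInv (d : PySem.Dict (List Char) Bool) (S : List (List Char)) : Prop :=
  (∀ p : List Char, (d.get? p).isSome ↔ (p = [] ∨ ∃ w ∈ S, p <+: w)) ∧
  (∀ (p : List Char) (b : Bool), d.get? p = some b → (b = true ↔ p ∈ S))

theorem trieInv_init : TrieInv (PySem.Dict.empty.insert [] false) [] := by
  constructor
  · intro p
    rw [PySem.Dict.get?_insert]
    by_cases h : p = ([] : List Char)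
    · simp [h]
    · simp [h, PySem.Dict.get?_empty]
  · intro p b hb
    rw [PySem.Dict.get?_insert] at hb
    by_cases hp : p = ([] : List Char)
    · rw [if_pos hp] at hb
      cases hb; simp
    · rw [if_neg hp, PySem.Dict.get?_empty] at hb
      cases hb

theorem trieIns_foldl (w : List Char) :
    ∀ (path : List Char) (d : PySem.Dict (List Char) Bool),
      (w.foldl trieIns (path, d)).1 = path ++ w ∧
      ∀ q : List Char, (w.foldl trieIns (path, d)).2.get? q =
        if (d.get? q).isSome then d.get? q
        else if ∃ t ∈ w.inits, t ≠ [] ∧ q = path ++ t then some false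
        else none := by
  induction w with
  | nil =>
      intro path d
      refine ⟨by simp, ?_⟩
      intro q
      by_cases h : (d.get? q).isSome
      · simp [h]
      · simp only [List.foldl_nil]
        rw [if_neg h, if_neg (by simp)]
        exact Option.not_isSome_iff_eq_none.mp h
  | cons ch rest ih =>
      intro path d
      have hstep : trieIns (path, d) ch =
          (path ++ [ch], if (d.get? (path ++ [ch])).isSome then d else d.insert (path ++ [ch]) false) := rfl
      constructor
      · simp only [List.foldl_cons, hstep, (ih _ _).1, List.append_assoc, List.singleton_append]
      · intro q
        simp only [List.foldl_cons, hstep]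
        rw [(ih (path ++ [ch]) _).2 q]
        have hinits : (∃ t ∈ (ch :: rest).inits, t ≠ [] ∧ q = path ++ t) ↔
            (q = path ++ [ch] ∨ ∃ t ∈ rest.inits, t ≠ [] ∧ q = (path ++ [ch]) ++ t) := by
          constructor
          · rintro ⟨t, ht, hne, rfl⟩
            rw [List.mem_inits] at ht
            rcases t with _ | ⟨c, t'⟩
            · exact absurd rfl hne
            · obtain ⟨u, hu⟩ := ht
              cases hu
              rcases t' with _ | ⟨c2, t2⟩
              · left; rfl
              · right
                exact ⟨c2 :: t2, by rw [List.mem_inits]; exact ⟨u, rfl⟩, by simp, by simp⟩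
          · rintro (rfl | ⟨t, ht, hne, rfl⟩)
            · exact ⟨[ch], by simp [List.mem_inits], by simp, rfl⟩
            · refine ⟨ch :: t, ?_, by simp, by simp⟩
              rw [List.mem_inits] at ht ⊢
              obtain ⟨u, hu⟩ := ht
              exact ⟨u, by simp [hu]⟩
        by_cases hp : (d.get? (path ++ [ch])).isSome
        · rw [if_pos hp]
          by_cases hq : (d.get? q).isSome
          · simp [hq]
          · rw [if_neg hq, if_neg hq]
            have hqne : q ≠ path ++ [ch] := by
              rintro rfl; exact hq hp
            by_cases hc : ∃ t ∈ rest.inits, t ≠ [] ∧ q = (path ++ [ch]) ++ t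
            · rw [if_pos hc, if_pos (hinits.mpr (Or.inr hc))]
            · rw [if_neg hc, if_neg (by rw [hinits]; rintro (h | h); exacts [hqne h, hc h])]
        · rw [if_neg hp]
          by_cases hq2 : q = path ++ [ch]
          · subst hq2
            rw [if_pos (by rw [PySem.Dict.get?_insert_self]; rfl), PySem.Dict.get?_insert_self,
                if_neg hp, if_pos (hinits.mpr (Or.inl rfl))]
          · rw [PySem.Dict.get?_insert]
            rw [if_neg hq2]
            by_cases hq : (d.get? q).isSome
            · simp [hq]
            · rw [if_neg hq, if_neg hq]
              by_cases hc : ∃ t ∈ rest.inits, t ≠ [] ∧ q = (path ++ [ch]) ++ t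
              · rw [if_pos hc, if_pos (hinits.mpr (Or.inr hc))]
              · rw [if_neg hc, if_neg (by rw [hinits]; rintro (h | h); exacts [hq2 h, hc h])]

theorem trieAdd_inv {d : PySem.Dict (List Char) Bool} {S : List (List Char)}
    (h : TrieInv d S) (w : List Char) : TrieInv (trieAdd d w) (S ++ [w]) := by
  obtain ⟨h1, h2⟩ := h
  obtain ⟨hfst, hget⟩ := trieIns_foldl w [] d
  have hget' : ∀ q, (trieAdd d w).get? q =
      if q = w then some true
      else if (d.get? q).isSome then d.get? q
      else if ∃ t ∈ w.inits, t ≠ [] ∧ q = t then some false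
      else none := by
    intro q
    unfold trieAdd
    rw [PySem.Dict.get?_insert, hfst]
    simp only [List.nil_append]
    by_cases hw : q = w
    · rw [if_pos hw, if_pos hw]
    · rw [if_neg hw, if_neg hw, hget q]
      simp
  constructor
  · intro p
    rw [hget' p]
    by_cases hw : p = w
    · subst hw
      rw [if_pos rfl]
      simp only [Option.isSome_some, true_iff]
      exact Or.inr ⟨p, by simp, List.prefix_refl p⟩
    · rw [if_neg hw]
      by_cases hq : (d.get? p).isSome
      · simp only [if_pos hq]
        constructor
        · intro _
          rcases (h1 p).mp hq with h' | ⟨u, hu, hpu⟩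
          · exact Or.inl h'
          · exact Or.inr ⟨u, by simp [hu], hpu⟩
        · intro _; exact hq
      · rw [if_neg hq]
        by_cases hc : ∃ t ∈ w.inits, t ≠ [] ∧ p = t
        · rw [if_pos hc]
          obtain ⟨t, ht, hne, rfl⟩ := hc
          rw [List.mem_inits] at ht
          simp only [Option.isSome_some, true_iff]
          exact Or.inr ⟨w, by simp, ht⟩
        · rw [if_neg hc]
          simp only [Option.isSome_none, Bool.false_eq_true, false_iff]
          rintro (rfl | ⟨u, hu, hpu⟩)
          · exact hq ((h1 []).mpr (Or.inl rfl))
          · rcases List.mem_append.mp hu with hu' | hu'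
            · exact hq ((h1 p).mpr (Or.inr ⟨u, hu', hpu⟩))
            · apply hc
              refine ⟨p, ?_, ?_, rfl⟩
              · rw [List.mem_inits]
                have huw : u = w := by simpa using hu'
                rw [← huw]; exact hpu
              · rintro rfl
                exact hq ((h1 []).mpr (Or.inl rfl))
  · intro p b hb
    rw [hget' p] at hb
    by_cases hw : p = w
    · subst hw
      rw [if_pos rfl] at hb
      cases hb
      simp
    · rw [if_neg hw] at hb
      by_cases hq : (d.get? p).isSome
      · rw [if_pos hq] at hb
        rw [h2 p b hb]
        simp [hw]
      · rw [if_neg hq] at hb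
        by_cases hc : ∃ t ∈ w.inits, t ≠ [] ∧ p = t
        · rw [if_pos hc] at hb
          cases hb
          simp only [Bool.false_eq_true, false_iff]
          intro hmem
          rcases List.mem_append.mp hmem with h' | h'
          · exact hq ((h1 p).mpr (Or.inr ⟨p, h', List.prefix_refl p⟩))
          · exact hw (by simpa using h')
        · rw [if_neg hc] at hb; cases hb

theorem trieBuild_inv (A : List (List Char)) :
    ∀ (d : PySem.Dict (List Char) Bool) (S : List (List Char)),
      TrieInv d S → TrieInv (A.foldl trieAdd d) (S ++ A) := by
  induction A with
  | nil => intro d S h; simpa using h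
  | cons w rest ih =>
      intro d S h
      have := ih (trieAdd d w) (S ++ [w]) (trieAdd_inv h w)
      simpa using this

theorem trieLookup_eq {d : PySem.Dict (List Char) Bool} {S : List (List Char)}
    (h : TrieInv d S) (w : List Char) :
    ∀ path : List Char, (d.get? path).isSome →
      trieLookup d path w = (if path ++ w ∈ S then 1 else 0) := by
  induction w with
  | nil =>
      intro path hp
      obtain ⟨b, hb⟩ := Option.isSome_iff_exists.mp hp
      have := h.2 path b hb
      cases b with
      | true => simp [trieLookup, hb, this.mp rfl]
      | false =>
          have hns : path ∉ S := fun hm => by simpa using this.mpr hm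
          simp [trieLookup, hb, hns]
  | cons ch rest ih =>
      intro path hp
      by_cases hc : (d.get? (path ++ [ch])).isSome
      · rw [trieLookup, if_pos hc, ih (path ++ [ch]) hc]
        simp
      · rw [trieLookup, if_neg hc]
        have : path ++ ch :: rest ∉ S := by
          intro hm
          exact hc ((h.1 (path ++ [ch])).mpr
            (Or.inr ⟨path ++ ch :: rest, hm, by simp⟩))
        simp [this]

theorem solve_eq_member (A B : List String) :
    solve A B = B.map (fun w => if w ∈ A then (1 : Int) else 0) := by
  unfold solve
  rw [PySem.List.foldl_append_singleton_eq_map]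
  apply List.map_congr_left
  intro w _
  have hinv : TrieInv (A.foldl (fun d w => trieAdd d w.toList) (PySem.Dict.empty.insert [] false))
      (A.map String.toList) := by
    have : A.foldl (fun d w => trieAdd d w.toList) (PySem.Dict.empty.insert [] false)
        = (A.map String.toList).foldl trieAdd (PySem.Dict.empty.insert [] false) := by
      rw [List.foldl_map]
    rw [this]
    simpa using trieBuild_inv (A.map String.toList) _ [] trieInv_init
  rw [trieLookup_eq hinv w.toList [] ((hinv.1 []).mpr (Or.inl rfl))]
  simp only [List.nil_append]
  congr 1
  simp only [List.mem_map, eq_iff_iff]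
  constructor
  · rintro ⟨s, hs, hts⟩
    rwa [← String.toList_inj.mp hts.symm] at hs
  · intro hw; exact ⟨w, hw, rfl⟩

-- ===== VERDICT (by name: the statement is the Claim_ definition above) =====
theorem solve_spec : Claim_equal_solve := by
  intro A B _
  unfold Spec_solve solve_alt
  rw [solve_eq_member]
  apply List.map_congr_left
  intro w _
  congr 1
  rw [PySem.Set.contains, eq_iff_iff]
  constructor
  · intro h; simpa using (PySem.Set.mem_ofList A w).mpr h
  · intro h; exact (PySem.Set.mem_ofList A w).mp (by simpa using h)
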